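-- pv_equiv track=rewrite | github.com/Berre47/Intro_a_la_progra | Mission 4/bioinfo.py | distances_matrice
-- ===== SOURCE A (Python) =====
-- def distance_h(text1,text2):
--     distance=0
--     if len(text1) != len(text2) :
--         return None
--     else:
--         for i,j in zip(text1,text2):
--             if i.lower() != j.lower():
--                 distance+=1
--     return distance
--
-- def distances_matrice(l):
--     matrix=[]
--     for i in l:
--         line = []
--         for j in l:
--             dis=distance_h(i,j)
--             line.append(dis)
--         matrix.append(line)
--     return matrix
-- ===== SOURCE B (Python) =====
-- def _dh(s, t):
--     # case-insensitive Hamming distance; None if lengths differ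
--     if len(s) != len(t):
--         return None
--     return sum(a.lower() != b.lower() for a, b in zip(s, t))
--
-- def distances_matrice(l):
--     # Alternative algorithm: only the strict upper triangle is computed; the lower triangle is mirrored
--     # from earlier rows and the diagonal is a literal 0.
--     rows = []
--     for i, s in enumerate(l):
--         row = [rows[j][i] for j in range(i)]
--         row.append(0)
--         row += [_dh(s, t) for t in l[i + 1:]]
--         rows.append(row)
--     return rows
-- ===== Notes on version B (the rewrite author's own statement) =====
-- stated objective: alternative
-- what changed: B computes each distance once for the strict upper triangle only, mirrors it into the lower triangle from previously built rows and writes a literal 0 on the diagonal, instead of A's full n*n recomputation; the per-pair distance is a sum-of-booleans comprehension instead of an explicit counter loop.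
import Mathlib
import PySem

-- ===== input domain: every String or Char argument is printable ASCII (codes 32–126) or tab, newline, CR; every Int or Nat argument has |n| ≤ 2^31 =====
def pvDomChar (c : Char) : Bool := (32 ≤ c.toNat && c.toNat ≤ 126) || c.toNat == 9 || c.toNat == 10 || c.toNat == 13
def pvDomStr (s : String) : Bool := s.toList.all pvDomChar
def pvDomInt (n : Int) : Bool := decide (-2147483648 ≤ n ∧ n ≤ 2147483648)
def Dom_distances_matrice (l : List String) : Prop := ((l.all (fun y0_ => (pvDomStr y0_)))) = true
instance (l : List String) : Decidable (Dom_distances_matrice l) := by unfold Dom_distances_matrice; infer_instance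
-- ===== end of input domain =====

-- B computes only the strict upper triangle of the matrix, mirrors it into the lower triangle
-- from earlier rows, and puts a literal 0 on the diagonal (objective: alternative algorithm).

-- ===== PORT A =====
-- distance_h: per-character counter loop over zip(text1, text2)
def distance_h (text1 text2 : String) : Option Int :=
  if PySem.Str.len text1 ≠ PySem.Str.len text2 then none
  else some ((text1.toList.zip text2.toList).foldl
    (fun distance p => if PySem.Chars.lowerChar p.1 ≠ PySem.Chars.lowerChar p.2 then distance + 1 else distance) 0)

def distances_matrice (l : List String) : List (List (Option Int)) :=
  l.foldl (fun matrix i =>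
    matrix ++ [l.foldl (fun line j => line ++ [distance_h i j]) []]) []

-- ===== PORT B =====
-- _dh: sum-of-booleans comprehension
def pvDh (s t : String) : Option Int :=
  if PySem.Str.len s ≠ PySem.Str.len t then none
  else some (((s.toList.zip t.toList).map
    (fun p => if PySem.Chars.lowerChar p.1 ≠ PySem.Chars.lowerChar p.2 then (1 : Int) else 0)).sum)

def distances_matrice_alt (l : List String) : List (List (Option Int)) :=
  (PySem.List.enumerate l 0).foldl (fun rows p =>
    rows ++ [ ((PySem.List.pyRange 0 p.1 1).map
                 (fun j => PySem.List.pyGetD (PySem.List.pyGetD rows j []) p.1 none))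
              ++ [some 0]
              ++ ((PySem.List.slice l (some (p.1 + 1)) none).map (fun t => pvDh p.2 t)) ]) []

-- ===== PRECONDITION & SPEC =====
def Spec_distances_matrice (l : List String) (out : List (List (Option Int))) : Prop := out = distances_matrice_alt l
instance (l : List String) (out : List (List (Option Int))) : Decidable (Spec_distances_matrice l out) := by unfold Spec_distances_matrice; infer_instance

-- ===== CLAIM (what is proved, stated in full; the proofs are below) =====
def Claim_equal_distances_matrice : Prop := ∀ (l : List String), Dom_distances_matrice l → Spec_distances_matrice l (distances_matrice l)

-- ===== LEMMAS AND PROOFS =====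

-- B's comprehension distance equals A's counter-loop distance
-- bridge: the Prop-test 0/1-sum of B's comprehension is a countP (the Bool-test form is
-- PySem.List.sum_map_ite_one_zero; this is its Prop-ite twin, specific to our mismatch test)
theorem pvSum_eq_countP (f : Char → Char) (xs : List (Char × Char)) :
    (xs.map (fun p => if f p.1 = f p.2 then (0:Int) else 1)).sum
      = ((xs.countP (fun p => !decide (f p.1 = f p.2)) : Nat) : Int) := by
  induction xs with
  | nil => simp
  | cons x t ih =>
    by_cases h : f x.1 = f x.2
    · simp [h, ih]
    · simp [h, ih]; ring

-- the two spellings of the mismatch test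
theorem pvPred_eq (f : Char → Char) :
    (fun p : Char × Char => decide (f p.1 ≠ f p.2)) = (fun p => !decide (f p.1 = f p.2)) := by
  funext p; simp

theorem pvDh_eq (s t : String) : pvDh s t = distance_h s t := by
  unfold pvDh distance_h
  rw [PySem.List.foldl_ite_add_one]
  have h1 : (fun p : Char × Char =>
      if PySem.Chars.lowerChar p.1 ≠ PySem.Chars.lowerChar p.2 then (1:Int) else 0)
      = (fun p => if PySem.Chars.lowerChar p.1 = PySem.Chars.lowerChar p.2 then 0 else 1) := by
    funext p; by_cases hc : PySem.Chars.lowerChar p.1 = PySem.Chars.lowerChar p.2 <;> simp [hc]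
  rw [h1, pvSum_eq_countP, pvPred_eq, zero_add]

-- the case-insensitive mismatch count is symmetric
theorem countP_zip_swap (f : Char → Char) : ∀ a b : List Char,
    (a.zip b).countP (fun p => !decide (f p.1 = f p.2))
      = (b.zip a).countP (fun p => !decide (f p.1 = f p.2)) := by
  intro a
  induction a with
  | nil => intro b; cases b <;> simp
  | cons x xs ih =>
    intro b
    cases b with
    | nil => simp
    | cons y ys =>
      simp only [List.zip_cons_cons, List.countP_cons, ih ys]
      rw [decide_eq_decide.mpr (eq_comm (a := f x) (b := f y))]

theorem distance_h_symm (s t : String) : distance_h t s = distance_h s t := by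
  unfold distance_h
  rw [PySem.List.foldl_ite_add_one, PySem.List.foldl_ite_add_one, pvPred_eq, countP_zip_swap]
  by_cases h : PySem.Str.len s = PySem.Str.len t
  · rw [if_neg (not_not_intro h.symm), if_neg (not_not_intro h)]
  · rw [if_pos (fun h' => h h'.symm), if_pos h]

theorem countP_zip_self (f : Char → Char) : ∀ a : List Char,
    (a.zip a).countP (fun p => decide (f p.1 ≠ f p.2)) = 0 := by
  intro a
  induction a with
  | nil => simp
  | cons x xs ih =>
    rw [List.zip_cons_cons, List.countP_cons, ih]
    simp

theorem distance_h_self (s : String) : distance_h s s = some 0 := by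
  unfold distance_h
  rw [PySem.List.foldl_ite_add_one, countP_zip_self]
  simp

-- row i of the matrix
def pvRow (l : List String) (i : Nat) : List (Option Int) :=
  l.map (distance_h (l.getD i ""))

theorem pvRow_getD (l : List String) (i k : Nat) (hk : k < l.length) :
    (pvRow l i).getD k none = distance_h (l.getD i "") (l.getD k "") := by
  unfold pvRow
  rw [List.getD_eq_getElem _ _ (by simpa using hk)]
  simp only [List.getElem_map]
  rw [List.getD_eq_getElem _ _ hk]

-- one step of B's loop extends the first-k-rows prefix by row k
theorem pvStep (l : List String) (k : Nat) (hk : k < l.length) :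
    ((PySem.List.pyRange 0 (k : Int) 1).map
        (fun j => PySem.List.pyGetD (PySem.List.pyGetD ((List.range k).map (pvRow l)) j []) (k : Int) none))
      ++ [some 0]
      ++ ((PySem.List.slice l (some ((k : Int) + 1)) none).map (fun t => pvDh (l.getD k "") t))
    = pvRow l k := by
  have hslice : PySem.List.slice l (some ((k : Int) + 1)) none = l.drop (k + 1) := by
    have : ((k : Int) + 1) = ((k + 1 : Nat) : Int) := by omega
    rw [this, PySem.List.slice_from_natCast]
  rw [hslice]
  have hmir : ((PySem.List.pyRange 0 (k : Int) 1).map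
        (fun j => PySem.List.pyGetD (PySem.List.pyGetD ((List.range k).map (pvRow l)) j []) (k : Int) none))
      = (List.range k).map (fun m => distance_h (l.getD k "") (l.getD m "")) := by
    rw [PySem.List.pyRange_one]
    rw [List.map_map]
    apply List.map_congr_left
    intro m hm
    have hmk : m < k := by simpa using hm
    simp only [Function.comp]
    have h1 : ((0 : Int) + (m : Int)) = ((m : Nat) : Int) := by omega
    rw [h1]
    simp only [PySem.List.pyGetD_natCast]
    rw [PySem.List.getD_map_range _ _ _ _ hmk]
    rw [pvRow_getD l m k hk]
    exact distance_h_symm _ _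
  rw [hmir]
  -- assemble: row k = mirror ++ [diagonal 0] ++ computed tail
  have hdecomp : l = l.take k ++ l.getD k "" :: l.drop (k + 1) := by
    conv_lhs => rw [← List.take_append_drop k l]
    congr 1
    rw [List.getD_eq_getElem _ _ hk]
    exact (List.getElem_cons_drop hk).symm
  have hrow2 : ∀ g : String, g = l.getD k "" →
      l.map (distance_h g)
        = (List.range k).map (fun m => distance_h g (l.getD m ""))
          ++ [some 0]
          ++ (l.drop (k + 1)).map (fun t => pvDh g t) := by
    intro g hg
    conv_lhs => rw [hdecomp]
    rw [List.map_append, List.map_cons]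
    have htake : (l.take k).map (distance_h g)
        = (List.range k).map (fun m => distance_h g (l.getD m "")) := by
      apply List.ext_getElem
      · simp [Nat.min_eq_left (le_of_lt hk)]
      · intro m h1 h2
        have hmk : m < k := by simpa using h2
        simp only [List.getElem_map, List.getElem_range, List.getElem_take]
        congr 1
        rw [List.getD_eq_getElem _ _ (lt_of_lt_of_le hmk (le_of_lt hk))]
    have htail : (l.drop (k + 1)).map (distance_h g)
        = (l.drop (k + 1)).map (fun t => pvDh g t) := by
      apply List.map_congr_left
      intro t _
      exact (pvDh_eq _ _).symm
    have hdiag : distance_h g (l.getD k "") = some 0 := by rw [hg]; exact distance_h_self _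
    rw [htake, htail, hdiag, ← List.singleton_append, ← List.append_assoc]
  have hrow : pvRow l k
      = (List.range k).map (fun m => distance_h (l.getD k "") (l.getD m ""))
        ++ [some 0]
        ++ (l.drop (k + 1)).map (fun t => pvDh (l.getD k "") t) := by
    unfold pvRow; exact hrow2 _ rfl
  rw [hrow]

-- B's fold over the remaining suffix completes the matrix
theorem pvLoop (l : List String) : ∀ (t : List String) (k : Nat),
    t = l.drop k → k ≤ l.length →
    (PySem.List.enumerate t (k : Int)).foldl (fun rows p =>
      rows ++ [ ((PySem.List.pyRange 0 p.1 1).map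
                   (fun j => PySem.List.pyGetD (PySem.List.pyGetD rows j []) p.1 none))
                ++ [some 0]
                ++ ((PySem.List.slice l (some (p.1 + 1)) none).map (fun t => pvDh p.2 t)) ])
      ((List.range k).map (pvRow l))
    = (List.range l.length).map (pvRow l) := by
  intro t
  induction t with
  | nil =>
    intro k ht hk
    have h0 := congrArg List.length ht
    simp at h0
    have hkl : k = l.length := by omega
    subst hkl
    simp [PySem.List.enumerate_nil]
  | cons s t' ih =>
    intro k ht hk
    have hklt : k < l.length := by
      by_contra h
      rw [List.drop_eq_nil_of_le (by omega)] at ht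
      exact List.cons_ne_nil _ _ ht
    rw [← List.getElem_cons_drop hklt] at ht
    injection ht with hs0 ht'
    have hs : s = l.getD k "" := by rw [List.getD_eq_getElem _ _ hklt]; exact hs0
    rw [PySem.List.enumerate_cons, List.foldl_cons]
    have hstep : ((List.range k).map (pvRow l)) ++
        [ ((PySem.List.pyRange 0 (k : Int) 1).map
             (fun j => PySem.List.pyGetD (PySem.List.pyGetD ((List.range k).map (pvRow l)) j []) (k : Int) none))
          ++ [some 0]
          ++ ((PySem.List.slice l (some ((k : Int) + 1)) none).map (fun t => pvDh s t)) ]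
        = (List.range (k + 1)).map (pvRow l) := by
      rw [hs, pvStep l k hklt, List.range_succ, List.map_append]
      simp
    have hcast : ((k : Int) + 1) = ((k + 1 : Nat) : Int) := by omega
    rw [hstep, hcast]
    exact ih (k + 1) ht' (by omega)

-- ===== VERDICT (by name: the statement is the Claim_ definition above) =====
theorem distances_matrice_spec : Claim_equal_distances_matrice := by
  intro l _
  unfold Spec_distances_matrice distances_matrice distances_matrice_alt
  rw [PySem.List.foldl_append_singleton_eq_map]
  have hA : l.map (fun i => l.foldl (fun line j => line ++ [distance_h i j]) [])
      = (List.range l.length).map (pvRow l) := by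
    apply List.ext_getElem
    · simp
    · intro i h1 h2
      simp only [List.getElem_map, List.getElem_range]
      rw [PySem.List.foldl_append_singleton_eq_map]
      unfold pvRow
      simp only [List.nil_append]
      congr 1
      rw [List.getD_eq_getElem _ _ (by simpa using h1)]
  rw [List.nil_append, hA]
  have := pvLoop l l 0 (by simp) (by omega)
  simpa using this.symm
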